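-- pv_equiv track=rewrite | github.com/gutohertzog/python-senac | 2.aplicacao-desktop-python/exercicios/calc_rom_func.py | valida_x
-- ===== SOURCE A (Python) =====
-- def valida_x(seguintes: str) -> bool:
--     """validação específica para o algarismo X"""
--     # verificando para os algarismos proibidos depois de X
--     for alg in 'DM':
--         # se algum proibido estiver depois de X, o número é inválido
--         if alg in seguintes:
--             return False
--     # depois, verifica se a quantidade de C é maior que 1 após ele
--     # (L já foi verificado na validação de quantidade)
--     if seguintes.count('C') > 1:
--         return False
--     # exluindo os casos de XXC, por exemplo
--     for alg in 'LC':
--         # se o algarismo estiver a partir da segunda posição de X, o número é inválido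
--         if alg in seguintes[1:]:
--             return False
--     return True
-- ===== SOURCE B (Python) =====
-- def valida_x(seguintes: str) -> bool:
--     """validação específica para o algarismo X (single pass over the string)"""
--     for i, alg in enumerate(seguintes):
--         if alg in 'DM':
--             return False
--         if i >= 1 and alg in 'LC':
--             return False
--     return True
-- ===== Notes on version B (the rewrite author's own statement) =====
-- stated objective: simpler
-- what changed: A makes up to five separate whole-string scans (two membership tests, a character count, two tail membership tests); B decides validity in a single indexed pass over the characters, rejecting on the first offending character and dropping the redundant count check.
import Mathlib
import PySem

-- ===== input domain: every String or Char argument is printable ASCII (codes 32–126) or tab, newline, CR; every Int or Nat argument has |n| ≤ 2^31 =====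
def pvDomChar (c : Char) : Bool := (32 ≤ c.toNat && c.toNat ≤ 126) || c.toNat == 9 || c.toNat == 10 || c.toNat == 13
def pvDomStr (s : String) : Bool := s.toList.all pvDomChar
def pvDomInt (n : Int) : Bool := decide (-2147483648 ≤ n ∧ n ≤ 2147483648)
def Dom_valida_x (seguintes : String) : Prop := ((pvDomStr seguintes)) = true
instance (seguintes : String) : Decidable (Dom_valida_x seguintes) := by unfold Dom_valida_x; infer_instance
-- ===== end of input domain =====

-- B validates in ONE indexed pass over the string what A computes with several
-- separate whole-string scans (membership tests, a count, and tail scans); same result, simpler shape.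


-- ===== PORT A =====
-- Literal port of A: the 'for alg in "DM"' loop unrolled over its two literal
-- characters; 'alg in seguintes' = PySem.Chars.isIn; seguintes.count('C') =
-- PySem.Chars.count; seguintes[1:] = PySem.Chars.slice.
def valida_x (seguintes : String) : Bool :=
  let l := seguintes.toList
  if PySem.Chars.isIn ['D'] l then false
  else if PySem.Chars.isIn ['M'] l then false
  else if PySem.Chars.count l ['C'] > 1 then false
  else
    let tail := PySem.Chars.slice l (some 1) none
    if PySem.Chars.isIn ['L'] tail then false
    else if PySem.Chars.isIn ['C'] tail then false
    else true

-- ===== PORT B =====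
-- Literal port of B: one pass over the characters with their index.
def validaXGo : List Char → Nat → Bool
  | [], _ => true
  | c :: rest, i =>
    if c = 'D' ∨ c = 'M' then false
    else if 1 ≤ i ∧ (c = 'L' ∨ c = 'C') then false
    else validaXGo rest (i + 1)

def valida_x_alt (seguintes : String) : Bool :=
  validaXGo seguintes.toList 0

-- ===== PRECONDITION & SPEC =====
def Spec_valida_x (seguintes : String) (out : Bool) : Prop := out = valida_x_alt seguintes
instance (seguintes : String) (out : Bool) : Decidable (Spec_valida_x seguintes out) := by unfold Spec_valida_x; infer_instance

-- ===== CLAIM (what is proved, stated in full; the proofs are below) =====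
def Claim_equal_valida_x : Prop := ∀ (seguintes : String), Dom_valida_x seguintes → Spec_valida_x seguintes (valida_x seguintes)

-- ===== LEMMAS AND PROOFS =====

-- PySem.Chars.count of a one-character pattern is List.count (no PySem lemma covers this).
theorem pv_countGo (c : Char) (fuel : Nat) : ∀ (l : List Char) (acc : Nat), l.length ≤ fuel →
    PySem.Chars.count.go [c] fuel l acc = acc + l.count c := by
  induction fuel with
  | zero => intro l acc h; have : l = [] := by cases l <;> simp_all
            subst this; simp [PySem.Chars.count.go]
  | succ n ih =>
    intro l acc h
    cases l with
    | nil => simp [PySem.Chars.count.go]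
    | cons x t =>
      simp only [PySem.Chars.count.go, List.isPrefixOf, List.length_cons] at *
      by_cases hx : c = x
      · subst hx
        rw [if_pos (by simp)]
        show PySem.Chars.count.go [c] n t (acc + 1) = _
        rw [ih t (acc + 1) (by omega), List.count_cons]
        simp; omega
      · simp [hx, ih t acc (by omega), Ne.symm hx]

theorem pv_count_singleton (c : Char) (l : List Char) :
    PySem.Chars.count l [c] = l.count c := by
  simp [PySem.Chars.count, pv_countGo c l.length l 0 le_rfl]

-- one-character 'in' is list membership
theorem pv_isIn_singleton (c : Char) (l : List Char) :
    PySem.Chars.isIn [c] l = true ↔ c ∈ l := by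
  rw [PySem.Chars.isIn_iff_infix]
  exact List.singleton_infix_iff c l

-- B's loop at index ≥ 1 rejects exactly the strings containing D, M, L or C
theorem pv_go_ge_one (l : List Char) : ∀ i : Nat, 1 ≤ i →
    (validaXGo l i = true ↔ ∀ c ∈ l, c ≠ 'D' ∧ c ≠ 'M' ∧ c ≠ 'L' ∧ c ≠ 'C') := by
  induction l with
  | nil => intro i _; simp [validaXGo]
  | cons c t ih =>
    intro i hi
    simp only [validaXGo]
    by_cases h1 : c = 'D' ∨ c = 'M'
    · rw [if_pos h1]
      simp only [Bool.false_eq_true, false_iff, not_forall]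
      refine ⟨c, by simp, ?_⟩
      rcases h1 with h | h <;> simp [h]
    · by_cases h2 : c = 'L' ∨ c = 'C'
      · rw [if_neg h1, if_pos ⟨hi, h2⟩]
        simp only [Bool.false_eq_true, false_iff, not_forall]
        refine ⟨c, by simp, ?_⟩
        rcases h2 with h | h <;> simp [h]
      · rw [if_neg h1, if_neg (by tauto), ih (i + 1) (by omega)]
        constructor
        · intro hall x hx
          rcases List.mem_cons.mp hx with rfl | hx
          · exact ⟨by tauto, by tauto, by tauto, by tauto⟩
          · exact hall x hx
        · intro hall x hx; exact hall x (List.mem_cons_of_mem _ hx)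

-- list-level equivalence of the two ports
theorem pv_main (l : List Char) :
    (if PySem.Chars.isIn ['D'] l then false
     else if PySem.Chars.isIn ['M'] l then false
     else if PySem.Chars.count l ['C'] > 1 then false
     else
       let tail := PySem.Chars.slice l (some 1) none
       if PySem.Chars.isIn ['L'] tail then false
       else if PySem.Chars.isIn ['C'] tail then false
       else true) = validaXGo l 0 := by
  have hslice : PySem.Chars.slice l (some 1) none = l.drop 1 := by simp [pysem]
  cases l with
  | nil => decide
  | cons c t =>
    have htail : (c :: t).drop 1 = t := rfl
    simp only [hslice, htail, pv_count_singleton]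
    by_cases h1 : c = 'D' ∨ c = 'M'
    · -- head is forbidden: both sides are false
      have hD : PySem.Chars.isIn ['D'] (c :: t) = true ∨ PySem.Chars.isIn ['M'] (c :: t) = true := by
        rcases h1 with h | h
        · exact Or.inl ((pv_isIn_singleton _ _).mpr (by simp [h]))
        · exact Or.inr ((pv_isIn_singleton _ _).mpr (by simp [h]))
      have hB : validaXGo (c :: t) 0 = false := by simp [validaXGo, h1]
      rcases hD with h | h <;> simp [h, hB]
    · -- head allowed: B reduces to the indexed tail loop
      have hB : validaXGo (c :: t) 0 = validaXGo t 1 := by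
        simp [validaXGo, h1]
      rw [hB]
      by_cases hT : ∀ x ∈ t, x ≠ 'D' ∧ x ≠ 'M' ∧ x ≠ 'L' ∧ x ≠ 'C'
      · -- clean tail: both sides are true
        rw [(pv_go_ge_one t 1 le_rfl).mpr hT]
        split_ifs with hD hM hC hL hCt
        · rcases List.mem_cons.mp ((pv_isIn_singleton _ _).mp hD) with h | h
          · exact absurd (Or.inl h.symm) h1
          · exact (hT _ h).1 rfl
        · rcases List.mem_cons.mp ((pv_isIn_singleton _ _).mp hM) with h | h
          · exact absurd (Or.inr h.symm) h1
          · exact (hT _ h).2.1 rfl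
        · -- count 'C' (c::t) ≤ 1 since 'C' ∉ t
          have ht0 : t.count 'C' = 0 := List.count_eq_zero.mpr (fun hc => (hT _ hc).2.2.2 rfl)
          rw [List.count_cons, ht0] at hC
          split at hC <;> omega
        · exact absurd ((pv_isIn_singleton _ _).mp hL) (fun hh => (hT _ hh).2.2.1 rfl)
        · exact absurd ((pv_isIn_singleton _ _).mp hCt) (fun hh => (hT _ hh).2.2.2 rfl)
        · rfl
      · -- some offending character in the tail: both sides are false
        have hBf : validaXGo t 1 = false := by
          rw [Bool.eq_false_iff]
          exact fun hTrue => hT ((pv_go_ge_one t 1 le_rfl).mp hTrue)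
        rw [hBf]
        push Not at hT
        obtain ⟨x, hx, hbad⟩ := hT
        have hcases : x = 'D' ∨ x = 'M' ∨ x = 'L' ∨ x = 'C' := by tauto
        split_ifs with hD hM hC hL hCt
        · rfl
        · rfl
        · rfl
        · rfl
        · rfl
        · rcases hcases with rfl | rfl | rfl | rfl
          · exact absurd ((pv_isIn_singleton _ _).mpr (List.mem_cons_of_mem _ hx)) hD
          · exact absurd ((pv_isIn_singleton _ _).mpr (List.mem_cons_of_mem _ hx)) hM
          · exact absurd ((pv_isIn_singleton _ _).mpr hx) hL
          · exact absurd ((pv_isIn_singleton _ _).mpr hx) hCt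

-- ===== VERDICT (by name: the statement is the Claim_ definition above) =====
theorem valida_x_spec : Claim_equal_valida_x := by
  intro s _
  unfold Spec_valida_x valida_x valida_x_alt
  exact pv_main s.toList
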